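-- pv_equiv track=rewrite | github.com/Mohamed-sa3d200/Conversion-of-Numbers-Systems | Conversion-of-Numbers-Systems/Conversion Systems.py | hexadecimal_to_octal
-- ===== SOURCE A (Python) =====
-- def hexadecimal_to_octal(your_num):
--     hex_chars = "0123456789ABCDEF"
--     octResult = ""
--     decimal_result = 0
--     for hex_digit in your_num:
--         decimal_result = decimal_result * 16 + hex_chars.index(hex_digit)
--     while decimal_result > 0:
--         rem = decimal_result % 8
--         octResult = str(rem) + octResult
--         decimal_result //= 8
--     return octResult
-- ===== SOURCE B (Python) =====
-- def hexadecimal_to_octal(your_num):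
--     hex_chars = "0123456789ABCDEF"
--     bits = "".join(format(hex_chars.index(d), '04b') for d in your_num)
--     bits = "0" * ((3 - len(bits) % 3) % 3) + bits
--     octs = "".join(str(int(bits[i:i + 3], 2)) for i in range(0, len(bits), 3))
--     return octs.lstrip("0")
-- ===== Notes on version B (the rewrite author's own statement) =====
-- stated objective: idiomatic
-- what changed: Replaces A's accumulate-to-one-big-decimal fold plus repeated divide-by-8 loop with the textbook hex-to-octal route: emit 4 bits per hex digit, left-pad to a multiple of 3, regroup into 3-bit slices, map each to its octal digit and strip leading zeros.
import Mathlib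
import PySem

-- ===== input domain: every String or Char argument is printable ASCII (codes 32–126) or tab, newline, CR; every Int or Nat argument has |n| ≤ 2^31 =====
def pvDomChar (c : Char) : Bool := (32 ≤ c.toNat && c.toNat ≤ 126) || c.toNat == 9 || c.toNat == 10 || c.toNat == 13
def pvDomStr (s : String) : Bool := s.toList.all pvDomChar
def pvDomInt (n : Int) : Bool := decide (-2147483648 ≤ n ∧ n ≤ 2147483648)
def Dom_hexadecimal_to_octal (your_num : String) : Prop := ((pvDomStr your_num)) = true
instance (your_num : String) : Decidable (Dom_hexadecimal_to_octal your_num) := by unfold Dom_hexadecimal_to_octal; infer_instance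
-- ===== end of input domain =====

-- B converts via a binary-string intermediate (4 bits per hex digit, regrouped into 3-bit
-- octal digits) instead of A's accumulate-to-decimal-then-divide loop; objective: idiomatic/alternative.

-- ===== PORT A =====
-- hex_chars = "0123456789ABCDEF", shared by both ports
def pvHex : List Char := "0123456789ABCDEF".toList

-- hex_chars.index(c); the ValueError case (c not in hex_chars) is excluded by Pre_, so getD 0 is unreached there
def pvIdx (c : Char) : Nat := (PySem.List.index? pvHex c).getD 0

-- decimal_result stays nonnegative throughout (it starts at 0 and the digits are ≥ 0),
-- so Nat arithmetic is exact: Python's % 8 and // 8 on nonnegative ints are Nat.mod/Nat.div.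
def pvOctLoopA (n : Nat) (acc : List Char) : List Char :=
  if 0 < n then pvOctLoopA (n / 8) (PySem.Int.toChars ((n % 8 : Nat) : Int) ++ acc) else acc

def hexadecimal_to_octal (your_num : String) : String :=
  String.ofList (pvOctLoopA (your_num.toList.foldl (fun a c => a * 16 + pvIdx c) 0) [])

-- ===== PORT B =====
-- format(n, '04b') for 0 ≤ n < 16: the four bits, most significant first
def pvBitc (b : Bool) : Char := if b then '1' else '0'
def pvFourBits (n : Nat) : List Char :=
  [pvBitc (n / 8 % 2 == 1), pvBitc (n / 4 % 2 == 1), pvBitc (n / 2 % 2 == 1), pvBitc (n % 2 == 1)]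

-- the slices bits[i:i+3] for i in range(0, len(bits), 3)
def pvChunks3 (l : List Char) : List (List Char) :=
  match l with
  | [] => []
  | x :: xs => (x :: xs).take 3 :: pvChunks3 ((x :: xs).drop 3)
termination_by l.length
decreasing_by simp

-- str(int(g, 2)); int(g, 2) never raises on the '0'/'1' groups B builds, so getD 0 is unreached
def pvOctDigit (g : List Char) : List Char :=
  PySem.Int.toChars ((PySem.Int.ofCharsBase? g 2).getD 0)

def hexadecimal_to_octal_alt (your_num : String) : String :=
  let bits := your_num.toList.flatMap (fun d => pvFourBits (pvIdx d))
  let padded := List.replicate ((3 - bits.length % 3) % 3) '0' ++ bits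
  -- octs.lstrip("0") on the char list: drop the leading '0' characters (exact for this chars argument)
  String.ofList (((pvChunks3 padded).flatMap pvOctDigit).dropWhile (· == '0'))

-- ===== PRECONDITION & SPEC =====
-- Pre_ excludes exactly the inputs where A raises ValueError: a character outside "0123456789ABCDEF"
def Pre_hexadecimal_to_octal (your_num : String) : Prop :=
  (your_num.toList.all (fun c => pvHex.contains c)) = true
instance (your_num : String) : Decidable (Pre_hexadecimal_to_octal your_num) := by
  unfold Pre_hexadecimal_to_octal; infer_instance
def pvWitness_hexadecimal_to_octal : String := "1A"
def Spec_hexadecimal_to_octal (your_num : String) (out : String) : Prop :=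
  out = hexadecimal_to_octal_alt your_num
instance (your_num : String) (out : String) : Decidable (Spec_hexadecimal_to_octal your_num out) := by
  unfold Spec_hexadecimal_to_octal; infer_instance

-- ===== CLAIM (what is proved, stated in full; the proofs are below) =====
def Claim_equal_hexadecimal_to_octal : Prop := ∀ (your_num : String), Dom_hexadecimal_to_octal your_num → Pre_hexadecimal_to_octal your_num → Spec_hexadecimal_to_octal your_num (hexadecimal_to_octal your_num)

-- ===== LEMMAS AND PROOFS =====

-- value of a bit string, most significant first
def pvBitsVal (a : Nat) (l : List Char) : Nat :=
  l.foldl (fun x c => 2 * x + (if c == '1' then 1 else 0)) a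

def pvAllBits (l : List Char) : Prop := ∀ c ∈ l, c = '0' ∨ c = '1'

-- the k-digit base-8 representation of n (with leading zeros)
def pvR (k : Nat) (n : Nat) : List Char :=
  match k with
  | 0 => []
  | k + 1 => pvR k (n / 8) ++ PySem.Int.toChars ((n % 8 : Nat) : Int)

-- the no-leading-zeros base-8 representation (A's while loop, accumulator made explicit)
def pvOctRec (n : Nat) : List Char :=
  if 0 < n then pvOctRec (n / 8) ++ PySem.Int.toChars ((n % 8 : Nat) : Int) else []

theorem pvIdx_lt (c : Char) : pvIdx c < 16 := by
  unfold pvIdx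
  cases h : PySem.List.index? pvHex c with
  | none => simp
  | some k =>
    obtain ⟨hk, -, -⟩ := PySem.List.getElem_of_index?_eq_some h
    simpa [pvHex] using hk

theorem pvOctLoopA_eq (n : Nat) : ∀ acc, pvOctLoopA n acc = pvOctRec n ++ acc := by
  induction n using Nat.strong_induction_on with
  | _ n ih =>
    intro acc
    rw [pvOctLoopA, pvOctRec]
    by_cases h : 0 < n
    · rw [if_pos h, if_pos h, ih (n / 8) (Nat.div_lt_self h (by norm_num))]
      simp
    · simp [h]

theorem pvBitsVal_fourBits (a d : Nat) (hd : d < 16) :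
    pvBitsVal a (pvFourBits d) = a * 16 + d := by
  simp only [pvBitsVal, pvFourBits, pvBitc, List.foldl]
  split_ifs <;> simp_all <;> omega

theorem pvBitsVal_append (a : Nat) (l₁ l₂ : List Char) :
    pvBitsVal a (l₁ ++ l₂) = pvBitsVal (pvBitsVal a l₁) l₂ := by
  simp [pvBitsVal, List.foldl_append]

theorem pvBitsVal_flatMap (cs : List Char) : ∀ a,
    pvBitsVal a (cs.flatMap (fun d => pvFourBits (pvIdx d))) =
      cs.foldl (fun x c => x * 16 + pvIdx c) a := by
  induction cs with
  | nil => intro a; simp [pvBitsVal]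
  | cons c cs ih =>
    intro a
    rw [List.flatMap_cons, pvBitsVal_append, pvBitsVal_fourBits a _ (pvIdx_lt c), List.foldl_cons,
      ih]

theorem pvBitsVal_replicate : ∀ (k : Nat) (a : Nat), pvBitsVal a (List.replicate k '0') = a * 2 ^ k := by
  intro k
  induction k with
  | zero => intro a; simp [pvBitsVal]
  | succ k ih =>
    intro a
    rw [List.replicate_succ]
    show pvBitsVal (2 * a + (if ('0' : Char) == '1' then (1:Nat) else 0)) (List.replicate k '0') = _
    rw [ih]
    simp [pow_succ]
    ring

theorem pvBitsVal_shift (l : List Char) : ∀ a,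
    pvBitsVal a l = a * 2 ^ l.length + pvBitsVal 0 l := by
  induction l with
  | nil => intro a; simp [pvBitsVal]
  | cons c l ih =>
    intro a
    show pvBitsVal (2 * a + (if c == '1' then (1:Nat) else 0)) l
        = a * 2 ^ (c :: l).length + pvBitsVal (2 * 0 + (if c == '1' then (1:Nat) else 0)) l
    rw [ih (2 * a + (if c == '1' then (1:Nat) else 0)),
      ih (2 * 0 + (if c == '1' then (1:Nat) else 0))]
    simp only [List.length_cons, pow_succ]
    ring

theorem pvBitsVal_lt (l : List Char) : pvBitsVal 0 l < 2 ^ l.length := by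
  induction l with
  | nil => simp [pvBitsVal]
  | cons c l ih =>
    show pvBitsVal (2 * 0 + (if c == '1' then (1:Nat) else 0)) l < 2 ^ (c :: l).length
    rw [pvBitsVal_shift]
    have hmul : (2 * 0 + (if c == '1' then (1:Nat) else 0)) * 2 ^ l.length ≤ 1 * 2 ^ l.length :=
      Nat.mul_le_mul_right _ (by split <;> omega)
    simp only [List.length_cons, pow_succ] at *
    omega

theorem pvOctDigit_bits (b0 b1 b2 : Char) (h0 : b0 = '0' ∨ b0 = '1') (h1 : b1 = '0' ∨ b1 = '1')
    (h2 : b2 = '0' ∨ b2 = '1') :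
    pvOctDigit [b0, b1, b2] = PySem.Int.toChars ((pvBitsVal 0 [b0, b1, b2] : Nat) : Int) ∧
      pvBitsVal 0 [b0, b1, b2] < 8 := by
  rcases h0 with h0|h0 <;> rcases h1 with h1|h1 <;> rcases h2 with h2|h2 <;>
    subst h0 h1 h2 <;> exact ⟨by decide, by decide⟩

theorem pvR_split (g : Nat) (hg : g < 8) : ∀ k r, r < 8 ^ k →
    pvR (k + 1) (g * 8 ^ k + r) = PySem.Int.toChars ((g : Nat) : Int) ++ pvR k r := by
  intro k
  induction k with
  | zero =>
    intro r hr
    have : r = 0 := by omega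
    subst this
    show pvR 0 _ ++ _ = _
    have h1 : (g * 8 ^ 0 + 0) / 8 = 0 := by omega
    have h2 : (g * 8 ^ 0 + 0) % 8 = g := by omega
    rw [h1, h2, pvR]
    simp
  | succ k ih =>
    intro r hr
    have hq : g * 8 ^ (k + 1) + r = 8 * (g * 8 ^ k) + r := by ring
    have hp : (0:Nat) < 8 ^ k := pow_pos (by norm_num) k
    have hrk : r < 8 * 8 ^ k := by
      have : (8:Nat) ^ (k + 1) = 8 * 8 ^ k := by ring
      omega
    show pvR (k + 1) _ ++ _ = _
    have hdiv : (g * 8 ^ (k + 1) + r) / 8 = g * 8 ^ k + r / 8 := by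
      rw [hq]; omega
    have hmod : (g * 8 ^ (k + 1) + r) % 8 = r % 8 := by
      rw [hq]; omega
    rw [hdiv, hmod, ih (r / 8) (by omega)]
    show _ = _ ++ pvR (k + 1) r
    conv_rhs => rw [pvR]
    simp

theorem pvChunks_flatMap : ∀ (k : Nat) (l : List Char), pvAllBits l → l.length = 3 * k →
    (pvChunks3 l).flatMap pvOctDigit = pvR k (pvBitsVal 0 l) := by
  intro k
  induction k with
  | zero =>
    intro l _ hl
    have : l = [] := List.eq_nil_of_length_eq_zero (by omega)
    subst this
    rw [show pvChunks3 [] = [] from by rw [pvChunks3]]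
    rfl
  | succ k ih =>
    intro l hb hl
    match l, hl with
    | b0 :: b1 :: b2 :: rest, hl =>
      have hb0 := hb b0 (by simp)
      have hb1 := hb b1 (by simp)
      have hb2 := hb b2 (by simp)
      obtain ⟨hdig, hlt⟩ := pvOctDigit_bits b0 b1 b2 hb0 hb1 hb2
      have hrest : pvAllBits rest := fun c hc => hb c (by simp [hc])
      have hlen : rest.length = 3 * k := by simp at hl; omega
      rw [pvChunks3]
      simp only [List.take, List.drop, List.flatMap_cons]
      rw [ih rest hrest hlen, hdig]
      have hsplit : pvBitsVal 0 (b0 :: b1 :: b2 :: rest)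
          = pvBitsVal 0 [b0, b1, b2] * 8 ^ k + pvBitsVal 0 rest := by
        have := pvBitsVal_append 0 [b0, b1, b2] rest
        simp only [List.cons_append, List.nil_append] at this
        rw [this, pvBitsVal_shift rest, hlen]
        have : (2:Nat) ^ (3 * k) = 8 ^ k := by
          rw [pow_mul]; norm_num
        rw [this]
      have hrlt : pvBitsVal 0 rest < 8 ^ k := by
        have := pvBitsVal_lt rest
        rw [hlen, pow_mul] at this
        norm_num at this
        exact this
      rw [hsplit, pvR_split _ hlt k _ hrlt]

theorem pvOctRec_ne_nil (m : Nat) (hm : 0 < m) : pvOctRec m ≠ [] := by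
  rw [pvOctRec, if_pos hm]
  intro h
  rcases List.append_eq_nil_iff.mp h with ⟨-, h2⟩
  have h8 : m % 8 < 8 := Nat.mod_lt _ (by norm_num)
  interval_cases h : m % 8 <;> revert h2 <;> decide

theorem pvOctRec_small (m : Nat) (h1 : 0 < m) (h8 : m < 8) :
    pvOctRec m = PySem.Int.toChars ((m : Nat) : Int) := by
  rw [pvOctRec, if_pos h1]
  have hd : m / 8 = 0 := by omega
  have hm : m % 8 = m := by omega
  rw [hd, hm, pvOctRec]
  simp

set_option maxRecDepth 4096 in
theorem pvDropWhile_pvR : ∀ (k n : Nat), n < 8 ^ k →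
    (pvR k n).dropWhile (· == '0') = pvOctRec n := by
  intro k
  induction k with
  | zero =>
    intro n hn
    have : n = 0 := by simpa using hn
    subst this
    rw [pvOctRec]
    rfl
  | succ k ih =>
    intro n hn
    have hp : (0:Nat) < 8 ^ k := pow_pos (by norm_num) k
    have h8 : (8:Nat) ^ (k + 1) = 8 * 8 ^ k := by ring
    have hdivlt : n / 8 < 8 ^ k := by omega
    have ihd := ih (n / 8) hdivlt
    show (pvR k (n / 8) ++ _).dropWhile _ = _
    rw [List.dropWhile_append, ihd]
    by_cases hn0 : 0 < n
    · by_cases hq : 0 < n / 8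
      · rw [if_neg (by simp [pvOctRec_ne_nil _ hq])]
        conv_rhs => rw [pvOctRec, if_pos hn0]
      · have hz : n / 8 = 0 := by omega
        rw [hz]
        rw [if_pos (by rw [pvOctRec]; simp)]
        have hnm : n % 8 = n := by omega
        rw [hnm, pvOctRec_small n hn0 (by omega)]
        have hnd : 0 < n ∧ n < 8 := ⟨hn0, by omega⟩
        obtain ⟨h1, h2⟩ := hnd
        interval_cases n <;> decide
    · have hz : n = 0 := by omega
      subst hz
      rw [if_pos (by rw [pvOctRec]; simp)]
      rw [pvOctRec]
      simp [PySem.Int.toChars]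

-- ===== VERDICT (by name: the statement is the Claim_ definition above) =====
theorem pvFourBits_bits (n : Nat) : ∀ c ∈ pvFourBits n, c = '0' ∨ c = '1' := by
  intro c hc
  simp only [pvFourBits, List.mem_cons, List.not_mem_nil, or_false] at hc
  rcases hc with h | h | h | h <;> rw [h] <;> unfold pvBitc <;> split <;> simp

theorem hexadecimal_to_octal_spec : Claim_equal_hexadecimal_to_octal := by
  unfold Claim_equal_hexadecimal_to_octal
  intro s _ _
  unfold Spec_hexadecimal_to_octal hexadecimal_to_octal hexadecimal_to_octal_alt
  simp only []
  set cs := s.toList with hcs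
  set N := cs.foldl (fun a c => a * 16 + pvIdx c) 0 with hN
  set bits := cs.flatMap (fun d => pvFourBits (pvIdx d)) with hbits
  set p := (3 - bits.length % 3) % 3 with hpdef
  set padded := List.replicate p '0' ++ bits with hpad
  set K := (p + bits.length) / 3 with hK
  have hlen : padded.length = 3 * K := by
    rw [hpad]
    simp only [List.length_append, List.length_replicate]
    omega
  have hall : pvAllBits padded := by
    intro c hc
    rw [hpad] at hc
    rcases List.mem_append.mp hc with h | h
    · left; exact List.eq_of_mem_replicate h
    · obtain ⟨d, -, hd⟩ := List.mem_flatMap.mp h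
      exact pvFourBits_bits _ c hd
  have hval : pvBitsVal 0 padded = N := by
    rw [hpad, pvBitsVal_append, pvBitsVal_replicate, Nat.zero_mul, hbits, pvBitsVal_flatMap]
  have hNlt : N < 8 ^ K := by
    have h := pvBitsVal_lt padded
    rw [hlen, pow_mul, hval] at h
    norm_num at h
    exact h
  rw [pvOctLoopA_eq, List.append_nil,
    pvChunks_flatMap K padded hall hlen, hval, pvDropWhile_pvR K N hNlt]
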